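-- pv_equiv track=rewrite | github.com/nelsonlai/freelance | leetcode/leetcode_problems/codes/1794_count-pairs-of-equal-substrings-with-minimum-difference/python3.py | countQuadruples
-- ===== SOURCE A (Python) =====
-- from collections import defaultdict
--
-- def countQuadruples(firstString: str, secondString: str) -> int:
--     first_pos = defaultdict(list)
--     second_pos = defaultdict(list)
--
--     for i, char in enumerate(firstString):
--         first_pos[char].append(i)
--
--     for i, char in enumerate(secondString):
--         second_pos[char].append(i)
--
--     min_diff = float('inf')
--     count = 0
--
--     for char in first_pos:
--         if char in second_pos:
--             for i in first_pos[char]: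
--                 for j in second_pos[char]:
--                     diff = i - j
--                     if diff < min_diff:
--                         min_diff = diff
--                         count = 1
--                     elif diff == min_diff:
--                         count += 1
--
--     return count
-- ===== SOURCE B (Python) =====
-- def countQuadruples(firstString: str, secondString: str) -> int:
--     # O(n+m): per char only the first index in firstString and the last index in
--     # secondString can realize that char's minimal difference, and it does so uniquely.
--     first = {}
--     for i, c in enumerate(firstString):
--         first.setdefault(c, i)
--     last = {}
--     for j, c in enumerate(secondString):
--         last[c] = j
--     diffs = [i - last[c] for c, i in first.items() if c in last]
--     if not diffs:
--         return 0
--     return diffs.count(min(diffs))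
-- ===== Notes on version B (the rewrite author's own statement) =====
-- stated objective: faster
-- what changed: Instead of scanning every index pair (i, j) of each shared character while maintaining a running minimum and count, B records in one pass per string the first index of each character of firstString and the last index of each character of secondString (the unique pair realizing that character's minimal difference), builds the list of per-character differences, and returns the count of its minimum.
import Mathlib
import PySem

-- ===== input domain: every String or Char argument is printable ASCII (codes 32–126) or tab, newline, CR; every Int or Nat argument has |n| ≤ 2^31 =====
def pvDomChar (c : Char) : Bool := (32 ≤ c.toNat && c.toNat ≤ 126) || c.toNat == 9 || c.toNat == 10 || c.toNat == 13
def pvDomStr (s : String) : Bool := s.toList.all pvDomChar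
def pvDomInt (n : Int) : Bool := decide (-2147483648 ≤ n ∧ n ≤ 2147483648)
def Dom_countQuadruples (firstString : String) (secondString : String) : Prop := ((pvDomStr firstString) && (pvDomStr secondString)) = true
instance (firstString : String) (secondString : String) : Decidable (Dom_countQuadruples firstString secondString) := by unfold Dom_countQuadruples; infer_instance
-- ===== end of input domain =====

-- B replaces A's scan over all index pairs of each shared character by one pass recording,
-- per character, the first index in firstString and the last index in secondString
-- (the unique pair realizing that character's minimal difference), then counts the
-- characters attaining the global minimum.

-- ===== PORT A =====
-- running state (min_diff, count); min_diff = none models the initial float('inf')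
def aStep (st : Option Int × Int) (diff : Int) : Option Int × Int :=
  match st.1 with
  | none => (some diff, 1)
  | some m => if diff < m then (some diff, 1) else if diff = m then (some m, st.2 + 1) else st

def countQuadruples (firstString : String) (secondString : String) : Int :=
  let firstPos : PySem.Dict Char (List Int) :=
    (PySem.List.enumerate firstString.toList).foldl
      (fun d p => d.modify p.2 [] (fun v => v ++ [p.1])) PySem.Dict.empty
  let secondPos : PySem.Dict Char (List Int) :=
    (PySem.List.enumerate secondString.toList).foldl
      (fun d p => d.modify p.2 [] (fun v => v ++ [p.1])) PySem.Dict.empty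
  let res := firstPos.keys.foldl (fun st c =>
    if secondPos.contains c then
      (firstPos.getD c []).foldl (fun st i =>
        (secondPos.getD c []).foldl (fun st j => aStep st (i - j)) st) st
    else st) (none, 0)
  res.2

-- ===== PORT B =====
def countQuadruples_alt (firstString : String) (secondString : String) : Int :=
  let first : PySem.Dict Char Int :=
    (PySem.List.enumerate firstString.toList).foldl
      (fun d p => d.setdefault p.2 p.1) PySem.Dict.empty
  let last : PySem.Dict Char Int :=
    (PySem.List.enumerate secondString.toList).foldl
      (fun d p => d.insert p.2 p.1) PySem.Dict.empty
  -- [i - last[c] for c, i in first.items() if c in last]; the getD default is never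
  -- used since the filter guarantees the key is present
  let diffs : List Int :=
    (first.items.filter (fun q => last.contains q.1)).map
      (fun q => q.2 - last.getD q.1 0)
  if diffs = [] then 0
  else
    match PySem.List.min? diffs (fun x => x) with
    | some m => (PySem.List.count diffs m : Int)
    | none => 0

-- ===== PRECONDITION & SPEC =====
def Spec_countQuadruples (firstString : String) (secondString : String) (out : Int) : Prop := out = countQuadruples_alt firstString secondString
instance (firstString : String) (secondString : String) (out : Int) : Decidable (Spec_countQuadruples firstString secondString out) := by unfold Spec_countQuadruples; infer_instance

-- ===== CLAIM (what is proved, stated in full; the proofs are below) =====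
def Claim_equal_countQuadruples : Prop := ∀ (firstString : String) (secondString : String), Dom_countQuadruples firstString secondString → Spec_countQuadruples firstString secondString (countQuadruples firstString secondString)

-- ===== LEMMAS AND PROOFS =====

-- positions of c in cs, as increasing integers
def pos (cs : List Char) (c : Char) : List Int :=
  ((PySem.List.enumerate cs).filter (fun p => p.2 == c)).map (fun p => p.1)

-- all differences i - j for i a position in the first, j in the second string
def blk (p q : List Int) : List Int := p.flatMap (fun i => q.map (fun j => i - j))

-- the characters of fl also occurring in sl, in first-occurrence order
def shared (fl sl : List Char) : List Char :=
  (PySem.Set.ofList fl).filter (fun c => decide (c ∈ sl))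

-- B's per-character candidate difference
def dVal (fl sl : List Char) (c : Char) : Int :=
  (pos fl c).head?.getD 0 - (pos sl c).getLast?.getD 0

def bigL (fl sl : List Char) : List Int :=
  (shared fl sl).flatMap (fun c => blk (pos fl c) (pos sl c))

def diffsL (fl sl : List Char) : List Int := (shared fl sl).map (dVal fl sl)

-- "count of the minimum" of a list (0 on [])
def minCount (l : List Int) : Int :=
  match l with
  | [] => 0
  | x :: t => ((x :: t).count (t.foldl min x) : Int)

lemma pos_pairwise (cs : List Char) (c : Char) : (pos cs c).Pairwise (· < ·) := by
  unfold pos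
  rw [List.pairwise_map]
  exact (PySem.List.pairwise_lt_enumerate cs 0).filter _

lemma pos_ne_nil {cs : List Char} {c : Char} (h : c ∈ cs) : pos cs c ≠ [] := by
  unfold pos
  have : c ∈ List.map (fun x => x.2) (PySem.List.enumerate cs 0) := by
    rw [PySem.List.map_snd_enumerate]; exact h
  obtain ⟨p, hp, hpc⟩ := List.mem_map.mp this
  simp only [ne_eq, List.map_eq_nil_iff, List.filter_eq_nil_iff, not_forall]
  exact ⟨p, hp, by simp [hpc]⟩

lemma head_le_of_pairwise {p : List Int} (h : p.Pairwise (· < ·)) (hne : p ≠ []) :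
    ∀ y ∈ p, p.head hne ≤ y := by
  cases p with
  | nil => exact absurd rfl hne
  | cons a t =>
    intro y hy
    rcases List.mem_cons.mp hy with rfl | hyt
    · simp
    · exact le_of_lt ((List.pairwise_cons.mp h).1 y hyt)

lemma head_ge_of_pairwise {p : List Int} (h : p.Pairwise (fun a b => b < a)) (hne : p ≠ []) :
    ∀ y ∈ p, y ≤ p.head hne := by
  cases p with
  | nil => exact absurd rfl hne
  | cons a t =>
    intro y hy
    rcases List.mem_cons.mp hy with rfl | hyt
    · simp
    · exact le_of_lt ((List.pairwise_cons.mp h).1 y hyt)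

lemma le_getLast_of_pairwise {q : List Int} (h : q.Pairwise (· < ·)) (hne : q ≠ []) :
    ∀ y ∈ q, y ≤ q.getLast hne := by
  intro y hy
  rw [List.getLast_eq_head_reverse]
  exact head_ge_of_pairwise (List.pairwise_reverse.mpr h) (by simp [hne]) y (by simp [hy])

lemma blk_ge {p q : List Int} (hp : p.Pairwise (· < ·)) (hq : q.Pairwise (· < ·))
    (hpne : p ≠ []) (hqne : q ≠ []) :
    ∀ x ∈ blk p q, p.head hpne - q.getLast hqne ≤ x := by
  intro x hx
  obtain ⟨i, hi, hxi⟩ := List.mem_flatMap.mp hx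
  obtain ⟨j, hj, rfl⟩ := List.mem_map.mp hxi
  exact sub_le_sub (head_le_of_pairwise hp hpne i hi) (le_getLast_of_pairwise hq hqne j hj)

lemma blk_mem_min {p q : List Int} (hpne : p ≠ []) (hqne : q ≠ []) :
    p.head hpne - q.getLast hqne ∈ blk p q :=
  List.mem_flatMap.mpr ⟨p.head hpne, List.head_mem hpne,
    List.mem_map.mpr ⟨q.getLast hqne, List.getLast_mem hqne, rfl⟩⟩

lemma count_map_sub (q : List Int) (i m : Int) :
    (q.map (fun j => i - j)).count m = q.count (i - m) := by
  have hinj : Function.Injective (fun j : Int => i - j) := by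
    intro a b hab
    simp only at hab
    omega
  have := List.count_map_of_injective q (fun j : Int => i - j) hinj (i - m)
  simpa using this

lemma blk_count {p q : List Int} (hp : p.Pairwise (· < ·)) (hq : q.Pairwise (· < ·))
    (hpne : p ≠ []) (hqne : q ≠ []) {m : Int} (hm : m ≤ p.head hpne - q.getLast hqne) :
    (blk p q).count m = if m = p.head hpne - q.getLast hqne then 1 else 0 := by
  cases p with
  | nil => exact absurd rfl hpne
  | cons a t =>
    simp only [List.head_cons] at hm ⊢
    have hat : ∀ i ∈ a :: t, a ≤ i := by
      have := head_le_of_pairwise hp (by simp)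
      simpa using this
    unfold blk
    rw [List.count_flatMap]
    have hterm : ∀ i ∈ a :: t, (List.count m ∘ fun i => q.map (fun j => i - j)) i
        = if i = a ∧ m = a - q.getLast hqne then 1 else 0 := by
      intro i hi
      simp only [Function.comp_apply]
      rw [count_map_sub]
      by_cases hcase : i = a ∧ m = a - q.getLast hqne
      · obtain ⟨h1, h2⟩ := hcase
        have he : i - m = q.getLast hqne := by omega
        rw [he, if_pos ⟨h1, h2⟩]
        exact List.count_eq_one_of_mem hq.nodup (List.getLast_mem hqne)
      · rw [if_neg hcase]
        apply List.count_eq_zero.mpr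
        intro hmem
        have hle := le_getLast_of_pairwise hq hqne _ hmem
        have hhead := hat i hi
        exact hcase ⟨by omega, by omega⟩
    rw [List.map_congr_left hterm]
    by_cases hM : m = a - q.getLast hqne
    · rw [if_pos hM, List.map_cons, List.sum_cons, if_pos ⟨rfl, hM⟩]
      have hz : (t.map (fun i => if i = a ∧ m = a - q.getLast hqne then 1 else 0)).sum = 0 := by
        apply List.sum_eq_zero
        intro x hx
        obtain ⟨i, hi, rfl⟩ := List.mem_map.mp hx
        have hai : a < i := (List.pairwise_cons.mp hp).1 i hi
        exact if_neg (fun hc => absurd hc.1 (by omega))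
      rw [hz]
    · rw [if_neg hM, List.map_cons, List.sum_cons, if_neg (fun hc => hM hc.2)]
      have hz : (t.map (fun i => if i = a ∧ m = a - q.getLast hqne then 1 else 0)).sum = 0 := by
        apply List.sum_eq_zero
        intro x hx
        obtain ⟨i, hi, rfl⟩ := List.mem_map.mp hx
        exact if_neg (fun hc => hM hc.2)
      rw [hz]

lemma minList_spec (x : Int) (t : List Int) :
    t.foldl min x ∈ x :: t ∧ ∀ y ∈ x :: t, t.foldl min x ≤ y := by
  obtain ⟨h1, h2⟩ := PySem.List.foldl_min_le t x
  constructor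
  · rcases PySem.List.foldl_min_mem t x with h | h
    · rw [h]; exact List.mem_cons_self
    · exact List.mem_cons_of_mem _ h
  · intro y hy
    rcases List.mem_cons.mp hy with rfl | hyt
    · exact h1
    · exact h2 y hyt

lemma minCount_eq_of {l : List Int} (hne : l ≠ []) {m : Int}
    (hmem : m ∈ l) (hle : ∀ y ∈ l, m ≤ y) : minCount l = (l.count m : Int) := by
  cases l with
  | nil => exact absurd rfl hne
  | cons x t =>
    obtain ⟨h1, h2⟩ := minList_spec x t
    have : t.foldl min x = m := le_antisymm (h2 m hmem) (hle _ h1)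
    simp [minCount, this]

-- A's running (min, count) loop computes the count of the minimum
lemma foldA_some (l : List Int) : ∀ (m cnt : Int),
    l.foldl aStep (some m, cnt) =
      (some (l.foldl min m),
       (if l.foldl min m = m then cnt else 0) + (l.count (l.foldl min m) : Int)) := by
  induction l with
  | nil => intro m cnt; simp
  | cons d t ih =>
    intro m cnt
    simp only [List.foldl_cons]
    obtain ⟨hle, -⟩ := PySem.List.foldl_min_le t (min m d)
    by_cases h1 : d < m
    · have hmd : min m d = d := min_eq_right (le_of_lt h1)
      rw [show aStep (some m, cnt) d = (some d, 1) by simp [aStep, h1], ih]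
      simp only [hmd] at hle ⊢
      have hMm : t.foldl min d ≠ m := by omega
      refine Prod.ext rfl ?_
      rw [List.count_cons, if_neg hMm]
      by_cases h2 : t.foldl min d = d
      · simp [h2]; omega
      · have : ¬ (d == t.foldl min d) = true := by
          simp [beq_iff_eq]; exact fun hh => h2 hh.symm
        simp [h2, this]
    · by_cases h2 : d = m
      · subst h2
        rw [show aStep (some d, cnt) d = (some d, cnt + 1) by simp [aStep], ih]
        simp only [min_self]
        refine Prod.ext rfl ?_
        rw [List.count_cons]
        by_cases h3 : t.foldl min d = d
        · simp [h3]; omega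
        · have : ¬ (d == t.foldl min d) = true := by
            simp [beq_iff_eq]; exact fun hh => h3 hh.symm
          simp [h3, this]
      · have h3 : m < d := by omega
        have hmd : min m d = m := min_eq_left (le_of_lt h3)
        rw [show aStep (some m, cnt) d = (some m, cnt) by simp [aStep, h1, h2], ih]
        simp only [hmd] at hle ⊢
        refine Prod.ext rfl ?_
        rw [List.count_cons]
        have : ¬ (d == t.foldl min m) = true := by
          simp [beq_iff_eq]; omega
        simp [this]

lemma foldA_count (l : List Int) :
    (l.foldl aStep ((none : Option Int), (0 : Int))).2 = minCount l := by
  cases l with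
  | nil => simp [minCount]
  | cons x t =>
    rw [List.foldl_cons, show aStep ((none : Option Int), (0 : Int)) x = (some x, 1) from rfl,
      foldA_some]
    simp only [minCount]
    rw [List.count_cons]
    by_cases h : t.foldl min x = x
    · simp [h]; omega
    · have : ¬ (x == t.foldl min x) = true := by
        simp [beq_iff_eq]; exact fun hh => h hh.symm
      simp [h, this]

-- ===== port A reduced to minCount (bigL) =====

lemma dictA_getD (cs : List Char) (c : Char) :
    ((PySem.List.enumerate cs).foldl
      (fun d p => d.modify p.2 [] (fun v => v ++ [p.1])) PySem.Dict.empty).getD c []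
      = pos cs c := by
  have h : (PySem.List.enumerate cs).foldl
      (fun (d : PySem.Dict Char (List Int)) p => d.modify p.2 [] (fun v => v ++ [p.1])) PySem.Dict.empty
      = ((PySem.List.enumerate cs).map (fun p => (p.2, p.1))).foldl
          (fun d q => d.modify q.1 [] (fun v => v ++ [q.2])) PySem.Dict.empty := by
    rw [List.foldl_map]
  rw [h, PySem.Dict.getD_foldl_modify_append]
  simp [pos, List.filter_map, List.map_map, Function.comp_def]

lemma dictA_keys (cs : List Char) :
    ((PySem.List.enumerate cs).foldl
      (fun (d : PySem.Dict Char (List Int)) p => d.modify p.2 [] (fun v => v ++ [p.1])) PySem.Dict.empty).keys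
      = PySem.Set.ofList cs := by
  rw [PySem.Dict.keys_foldl_modify_key (PySem.List.enumerate cs) (fun p => p.2) []
        (fun _ p => fun v => v ++ [p.1]) PySem.Dict.empty]
  rw [PySem.Dict.keys_empty, PySem.Set.update_nil_left, PySem.List.map_snd_enumerate]

lemma A_eq (f s : String) :
    countQuadruples f s = minCount (bigL f.toList s.toList) := by
  have hcont : ∀ c : Char, ((PySem.List.enumerate s.toList).foldl
      (fun (d : PySem.Dict Char (List Int)) p => d.modify p.2 [] (fun v => v ++ [p.1])) PySem.Dict.empty).contains c
      = decide (c ∈ s.toList) := by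
    intro c
    rw [PySem.Dict.contains_eq_decide_mem_keys, dictA_keys]
    simp [PySem.Set.mem_ofList]
  have hinner : ∀ (st : Option Int × Int) (c : Char),
      (pos f.toList c).foldl (fun st i =>
        (pos s.toList c).foldl (fun st j => aStep st (i - j)) st) st
        = (blk (pos f.toList c) (pos s.toList c)).foldl aStep st := by
    intro st c
    rw [blk, List.foldl_flatMap]
    simp only [List.foldl_map]
  simp only [countQuadruples, hcont, dictA_getD, dictA_keys, hinner]
  rw [PySem.List.foldl_if_eq_foldl_filter (fun c => decide (c ∈ s.toList))
    (fun st c => (blk (pos f.toList c) (pos s.toList c)).foldl aStep st)]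
  rw [← List.foldl_flatMap]
  rw [foldA_count]
  rfl

-- ===== port B reduced to minCount (diffsL) =====

lemma firstFold_get? (l : List (Int × Char)) (d : PySem.Dict Char Int) (c : Char) :
    (l.foldl (fun d p => d.setdefault p.2 p.1) d).get? c
      = (d.get? c).or ((l.find? (fun p => p.2 == c)).map (fun p => p.1)) := by
  induction l generalizing d with
  | nil => simp
  | cons p t ih =>
    simp only [List.foldl_cons, ih]
    by_cases h : c = p.2
    · subst h
      rw [PySem.Dict.get?_setdefault_self, List.find?_cons_of_pos (by simp)]
      cases d.get? p.2 <;> simp [Option.or]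
    · rw [PySem.Dict.get?_setdefault_of_ne _ _ h,
        List.find?_cons_of_neg (by simp only [beq_iff_eq]; exact fun hh => h hh.symm)]

lemma firstFold_keys (l : List (Int × Char)) (d : PySem.Dict Char Int) :
    (l.foldl (fun d p => d.setdefault p.2 p.1) d).keys
      = PySem.Set.update d.keys (l.map (fun p => p.2)) := by
  induction l generalizing d with
  | nil => simp [PySem.Set.update]
  | cons p t ih =>
    simp only [List.foldl_cons, List.map_cons, ih, PySem.Set.update_cons]
    congr 1
    rw [PySem.Dict.keys_setdefault]
    by_cases h : d.contains p.2 = true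
    · rw [if_pos h, PySem.Set.add_of_mem ((PySem.Dict.contains_iff_mem_keys d p.2).mp h)]
    · rw [if_neg h, PySem.Set.add_of_not_mem
        (fun hm => h ((PySem.Dict.contains_iff_mem_keys d p.2).mpr hm))]

lemma lastFold_get? (l : List (Int × Char)) (d : PySem.Dict Char Int) (c : Char) :
    (l.foldl (fun d p => d.insert p.2 p.1) d).get? c
      = ((l.reverse.find? (fun p => p.2 == c)).map (fun p => p.1)).or (d.get? c) := by
  induction l generalizing d with
  | nil => simp
  | cons p t ih =>
    simp only [List.foldl_cons, ih, List.reverse_cons, List.find?_append, Option.map_or,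
      Option.or_assoc]
    congr 1
    rw [PySem.Dict.get?_insert]
    by_cases h : c = p.2
    · subst h; simp
    · rw [if_neg h]
      have hnone : (List.find? (fun p1 => p1.2 == c) [p]) = none := by
        simp; exact fun hh => h hh.symm
      rw [hnone]
      simp

lemma lastFold_keys (l : List (Int × Char)) :
    (l.foldl (fun (d : PySem.Dict Char Int) p => d.insert p.2 p.1) PySem.Dict.empty).keys
      = PySem.Set.ofList (l.map (fun p => p.2)) := by
  rw [PySem.Dict.keys_foldl_insert_key l (fun p => p.2) (fun _ p => p.1) PySem.Dict.empty,
    PySem.Dict.keys_empty, PySem.Set.update_nil_left]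

lemma diffs_eq (fl sl : List Char) :
    ((((PySem.List.enumerate fl).foldl (fun (d : PySem.Dict Char Int) p => d.setdefault p.2 p.1) PySem.Dict.empty)).items.filter
        (fun q => ((PySem.List.enumerate sl).foldl (fun (d : PySem.Dict Char Int) p => d.insert p.2 p.1) PySem.Dict.empty).contains q.1)).map
      (fun q => q.2 - ((PySem.List.enumerate sl).foldl (fun (d : PySem.Dict Char Int) p => d.insert p.2 p.1) PySem.Dict.empty).getD q.1 0)
      = diffsL fl sl := by
  set F := (PySem.List.enumerate fl).foldl (fun (d : PySem.Dict Char Int) p => d.setdefault p.2 p.1) PySem.Dict.empty with hF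
  set L := (PySem.List.enumerate sl).foldl (fun (d : PySem.Dict Char Int) p => d.insert p.2 p.1) PySem.Dict.empty with hL
  have hFkeys : F.keys = PySem.Set.ofList fl := by
    rw [hF, firstFold_keys, PySem.Dict.keys_empty, PySem.Set.update_nil_left,
      PySem.List.map_snd_enumerate]
  have hFnodup : F.keys.Nodup := hFkeys ▸ PySem.Set.nodup_ofList fl
  have hFget : ∀ c, F.get? c = (pos fl c).head? := by
    intro c
    rw [hF, firstFold_get?, PySem.Dict.get?_empty, Option.none_or]
    unfold pos
    rw [List.head?_map, List.head?_filter]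
  have hLget : ∀ c, L.get? c = (pos sl c).getLast? := by
    intro c
    rw [hL, lastFold_get?, PySem.Dict.get?_empty, Option.or_none]
    unfold pos
    rw [List.getLast?_map, List.getLast?_filter]
  have hLcont : ∀ c, L.contains c = decide (c ∈ sl) := by
    intro c
    rw [PySem.Dict.contains_eq_decide_mem_keys, hL, lastFold_keys,
      PySem.List.map_snd_enumerate]
    simp [PySem.Set.mem_ofList]
  rw [PySem.Dict.items_eq_map_keys F hFnodup 0, hFkeys, List.filter_map, List.map_map]
  unfold diffsL shared
  have hfil : List.filter ((fun q => L.contains q.1) ∘ (fun k => (k, F.getD k 0))) (PySem.Set.ofList fl)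
      = List.filter (fun c => decide (c ∈ sl)) (PySem.Set.ofList fl) := by
    apply List.filter_congr
    intro x _
    simp [hLcont x]
  rw [hfil]
  apply List.map_congr_left
  intro c hc
  simp only [Function.comp_apply]
  rw [PySem.Dict.getD_eq_get?_getD, PySem.Dict.getD_eq_get?_getD, hFget, hLget]
  rfl

lemma B_eq (f s : String) :
    countQuadruples_alt f s = minCount (diffsL f.toList s.toList) := by
  simp only [countQuadruples_alt, diffs_eq]
  by_cases h : diffsL f.toList s.toList = []
  · rw [if_pos h, h]; rfl
  · rw [if_neg h]
    cases hd : diffsL f.toList s.toList with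
    | nil => exact absurd hd h
    | cons x t =>
      rw [PySem.List.min?_id_cons]
      simp only [PySem.List.count_eq, minCount]

-- ===== bigL and diffsL have the same minimum with the same count =====

lemma shared_mem {fl sl : List Char} {c : Char} (h : c ∈ shared fl sl) :
    c ∈ fl ∧ c ∈ sl := by
  obtain ⟨h1, h2⟩ := List.mem_filter.mp h
  exact ⟨(PySem.Set.mem_ofList fl c).mp h1, of_decide_eq_true h2⟩

lemma dVal_eq {fl sl : List Char} {c : Char} (h1 : c ∈ fl) (h2 : c ∈ sl) :
    dVal fl sl c = (pos fl c).head (pos_ne_nil h1) - (pos sl c).getLast (pos_ne_nil h2) := by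
  unfold dVal
  rw [List.head?_eq_some_head (pos_ne_nil h1), List.getLast?_eq_some_getLast (pos_ne_nil h2)]
  rfl

lemma dVal_mem_blk {fl sl : List Char} {c : Char} (h1 : c ∈ fl) (h2 : c ∈ sl) :
    dVal fl sl c ∈ blk (pos fl c) (pos sl c) := by
  rw [dVal_eq h1 h2]; exact blk_mem_min _ _

lemma dVal_le_blk {fl sl : List Char} {c : Char} (h1 : c ∈ fl) (h2 : c ∈ sl) :
    ∀ x ∈ blk (pos fl c) (pos sl c), dVal fl sl c ≤ x := by
  rw [dVal_eq h1 h2]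
  exact blk_ge (pos_pairwise fl c) (pos_pairwise sl c) _ _

lemma blk_count_dVal {fl sl : List Char} {c : Char} (h1 : c ∈ fl) (h2 : c ∈ sl)
    {m : Int} (hm : m ≤ dVal fl sl c) :
    (blk (pos fl c) (pos sl c)).count m = if m = dVal fl sl c then 1 else 0 := by
  rw [dVal_eq h1 h2] at hm ⊢
  exact blk_count (pos_pairwise fl c) (pos_pairwise sl c) _ _ hm

lemma count_flat_eq (fl sl : List Char) (m : Int) (S : List Char)
    (hS : ∀ c ∈ S, c ∈ fl ∧ c ∈ sl ∧ m ≤ dVal fl sl c) :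
    (S.flatMap (fun c => blk (pos fl c) (pos sl c))).count m = (S.map (dVal fl sl)).count m := by
  induction S with
  | nil => simp
  | cons c S' ih =>
    obtain ⟨h1, h2, h3⟩ := hS c List.mem_cons_self
    rw [List.flatMap_cons, List.map_cons, List.count_append,
      ih (fun c hc => hS c (List.mem_cons_of_mem _ hc)),
      blk_count_dVal h1 h2 h3, List.count_cons]
    by_cases h : m = dVal fl sl c
    · subst h; simp [Nat.add_comm]
    · have : ¬ (dVal fl sl c == m) = true := by
        simp [beq_iff_eq]; exact fun hh => h hh.symm
      simp [h, this]

lemma final_eq (fl sl : List Char) : minCount (bigL fl sl) = minCount (diffsL fl sl) := by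
  cases hS : shared fl sl with
  | nil => simp [bigL, diffsL, hS, minCount]
  | cons c S' =>
    have hmem : ∀ x ∈ shared fl sl, x ∈ fl ∧ x ∈ sl := fun x hx => shared_mem hx
    have hd : diffsL fl sl = dVal fl sl c :: S'.map (dVal fl sl) := by
      simp [diffsL, hS]
    obtain ⟨hm_mem, hm_le⟩ := minList_spec (dVal fl sl c) (S'.map (dVal fl sl))
    rw [← hd] at hm_mem hm_le
    set m := (S'.map (dVal fl sl)).foldl min (dVal fl sl c) with hm_def
    have hdiff_mem : ∀ y ∈ diffsL fl sl, ∃ c0 ∈ shared fl sl, y = dVal fl sl c0 := by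
      intro y hy
      obtain ⟨c0, hc0, rfl⟩ := List.mem_map.mp hy
      exact ⟨c0, hc0, rfl⟩
    have hm_mem_big : m ∈ bigL fl sl := by
      obtain ⟨c0, hc0, hy⟩ := hdiff_mem m hm_mem
      obtain ⟨h1, h2⟩ := hmem c0 hc0
      exact List.mem_flatMap.mpr ⟨c0, hc0, hy ▸ dVal_mem_blk h1 h2⟩
    have hm_le_big : ∀ x ∈ bigL fl sl, m ≤ x := by
      intro x hx
      obtain ⟨c0, hc0, hxc0⟩ := List.mem_flatMap.mp hx
      obtain ⟨h1, h2⟩ := hmem c0 hc0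
      have hmemd : dVal fl sl c0 ∈ diffsL fl sl := List.mem_map.mpr ⟨c0, hc0, rfl⟩
      exact le_trans (hm_le _ hmemd) (dVal_le_blk h1 h2 x hxc0)
    have hbig_ne : bigL fl sl ≠ [] := by
      intro h
      rw [h] at hm_mem_big
      exact absurd hm_mem_big List.not_mem_nil
    have hdiff_ne : diffsL fl sl ≠ [] := by rw [hd]; simp
    rw [minCount_eq_of hbig_ne hm_mem_big hm_le_big,
      minCount_eq_of hdiff_ne hm_mem hm_le]
    congr 1
    unfold bigL diffsL
    exact count_flat_eq fl sl m (shared fl sl) (fun c0 hc0 =>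
      ⟨(hmem c0 hc0).1, (hmem c0 hc0).2,
        hm_le _ (List.mem_map.mpr ⟨c0, hc0, rfl⟩)⟩)

-- ===== VERDICT (by name: the statement is the Claim_ definition above) =====
theorem countQuadruples_spec : Claim_equal_countQuadruples := by
  intro f s _
  unfold Spec_countQuadruples
  rw [A_eq, B_eq, final_eq]
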